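-- pv_equiv track=rewrite | github.com/uma255/MTICA | day 13 program7.py | countreds
-- ===== SOURCE A (Python) =====
-- def countreds(aList):
--     count=0
--     for color,number in aList:
--         if color =='black':
--             yield count
--             count=0
--         else:
--             count +=1
--     yield count
-- ===== SOURCE B (Python) =====
-- def countreds(aList):
--     positions = [i for i, (color, number) in enumerate(aList) if color == 'black']
--     prev = -1
--     for p in positions:
--         yield p - prev - 1
--         prev = p
--     yield len(aList) - prev - 1
-- ===== Notes on version B (the rewrite author's own statement) =====
-- stated objective: alternative
-- what changed: Replaces the running counter reset at each 'black' by an index-table decomposition: collect the indices of the black items, then yield the gaps between consecutive black positions arithmetically.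
import Mathlib
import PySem

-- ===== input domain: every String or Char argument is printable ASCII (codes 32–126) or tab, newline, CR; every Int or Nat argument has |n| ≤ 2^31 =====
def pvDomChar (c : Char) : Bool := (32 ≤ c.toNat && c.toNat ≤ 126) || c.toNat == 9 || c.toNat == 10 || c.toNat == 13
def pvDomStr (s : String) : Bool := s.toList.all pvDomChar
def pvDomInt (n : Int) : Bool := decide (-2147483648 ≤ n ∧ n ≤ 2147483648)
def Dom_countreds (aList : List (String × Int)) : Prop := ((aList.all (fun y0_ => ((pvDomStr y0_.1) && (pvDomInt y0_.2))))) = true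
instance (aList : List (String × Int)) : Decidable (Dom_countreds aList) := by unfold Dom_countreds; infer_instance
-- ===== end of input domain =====

-- B replaces A's running counter with a black-index table plus gap arithmetic (alternative decomposition, same cost).


-- ===== PORT A =====
-- the generator loop: accumulate count, emit it at each 'black' and once at the end
def countredsGo : List (String × Int) → Int → List Int
  | [], count => [count]
  | p :: rest, count =>
      if p.1 == "black" then count :: countredsGo rest 0
      else countredsGo rest (count + 1)

def countreds (aList : List (String × Int)) : List Int := countredsGo aList 0

-- ===== PORT B =====
-- the comprehension: indices (from i upward) of the items whose color is 'black'
def blackIdx : List (String × Int) → Int → List Int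
  | [], _ => []
  | p :: rest, i =>
      if p.1 == "black" then i :: blackIdx rest (i + 1)
      else blackIdx rest (i + 1)

-- the loop over positions: yield the gap to the previous black position
def gapsGo (total : Int) : List Int → Int → List Int
  | [], prev => [total - prev - 1]
  | p :: ps, prev => (p - prev - 1) :: gapsGo total ps p

def countreds_alt (aList : List (String × Int)) : List Int :=
  gapsGo (aList.length : Int) (blackIdx aList 0) (-1)

-- ===== PRECONDITION & SPEC =====
def Spec_countreds (aList : List (String × Int)) (out : List Int) : Prop := out = countreds_alt aList
instance (aList : List (String × Int)) (out : List Int) : Decidable (Spec_countreds aList out) := by unfold Spec_countreds; infer_instance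

-- ===== CLAIM (what is proved, stated in full; the proofs are below) =====
def Claim_equal_countreds : Prop := ∀ (aList : List (String × Int)), Dom_countreds aList → Spec_countreds aList (countreds aList)

-- ===== LEMMAS AND PROOFS =====
theorem countredsGo_eq_gaps (l : List (String × Int)) :
    ∀ (i prev : Int), countredsGo l (i - prev - 1) = gapsGo (i + (l.length : Int)) (blackIdx l i) prev := by
  induction l with
  | nil => intro i prev; simp [countredsGo, blackIdx, gapsGo]
  | cons p rest ih =>
      intro i prev
      by_cases h : p.1 == "black"
      · have h2 := ih (i + 1) i
        have e1 : i + 1 - i - 1 = (0 : Int) := by ring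
        rw [e1] at h2
        simp only [countredsGo, blackIdx, gapsGo, h, if_pos, List.length_cons]
        push_cast
        rw [show i + ((rest.length : Int) + 1) = i + 1 + (rest.length : Int) from by ring, h2]
      · have h2 := ih (i + 1) prev
        have e1 : i + 1 - prev - 1 = i - prev - 1 + 1 := by ring
        rw [e1] at h2
        simp only [countredsGo, blackIdx, h, Bool.false_eq_true, if_false, List.length_cons]
        push_cast
        rw [show i + ((rest.length : Int) + 1) = i + 1 + (rest.length : Int) from by ring, h2]

-- ===== VERDICT (by name: the statement is the Claim_ definition above) =====
theorem countreds_spec : Claim_equal_countreds := by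
  intro aList _
  unfold Spec_countreds countreds countreds_alt
  have := countredsGo_eq_gaps aList 0 (-1)
  simpa using this
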